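-- pv_equiv track=rewrite | github.com/nmontpetit/Advent-of-Code-2023 | day_13/aoc_template.py | find_reflection_line
-- ===== SOURCE A (Python) =====
-- def find_reflection_line(pattern: list[list[str]]) -> int:
--     pattern_length = len(pattern)
--     for row_num in range(1, pattern_length):
--         length_1, length_2 = row_num, pattern_length - row_num
--         min_pattern_length = min(length_1, length_2)
--         sub_pattern_1, sub_pattern_2 = (
--             pattern[:row_num][::-1][:min_pattern_length],
--             pattern[row_num:][:min_pattern_length]
--         )
--
--         if all(
--             [ val_1 == val_2
--               for line_1, line_2 in zip(sub_pattern_1, sub_pattern_2)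
--               for val_1, val_2 in zip(line_1, line_2)
--             ]
--         ): return row_num
--
--     return None
-- ===== SOURCE B (Python) =====
-- def _rows_match(r1, r2):
--     m = len(r1) if len(r1) < len(r2) else len(r2)
--     for i in range(m):
--         if r1[i] != r2[i]:
--             return False
--     return True
--
--
-- def find_reflection_line(pattern: list[list[str]]) -> int:
--     n = len(pattern)
--     for b in range(1, n):
--         i, j = b - 1, b
--         while i >= 0 and j < n and _rows_match(pattern[i], pattern[j]):
--             i -= 1
--             j += 1
--         if i < 0 or j >= n:
--             return b
--     return None
-- ===== Notes on version B (the rewrite author's own statement) =====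
-- stated objective: faster
-- what changed: Replaces A's per-candidate slicing/reversing and fully-built flattened comparison list with an outward two-pointer scan from the candidate boundary that stops at the first mismatching row element.
import Mathlib
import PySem

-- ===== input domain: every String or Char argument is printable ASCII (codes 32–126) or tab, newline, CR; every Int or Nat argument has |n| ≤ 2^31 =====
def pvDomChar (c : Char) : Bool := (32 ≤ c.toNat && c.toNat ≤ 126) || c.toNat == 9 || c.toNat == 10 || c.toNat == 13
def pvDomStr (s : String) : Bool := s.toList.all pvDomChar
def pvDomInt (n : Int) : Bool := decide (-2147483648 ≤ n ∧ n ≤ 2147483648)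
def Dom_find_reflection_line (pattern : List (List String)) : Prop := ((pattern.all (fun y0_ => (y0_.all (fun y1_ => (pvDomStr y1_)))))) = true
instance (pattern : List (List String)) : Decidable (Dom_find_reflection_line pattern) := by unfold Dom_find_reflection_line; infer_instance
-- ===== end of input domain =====

-- B replaces A's per-candidate slicing/reversing and fully-materialised flattened comparison list
-- with an outward two-pointer scan that stops at the first mismatching row element (objective: faster,
-- constant-factor early exit).

-- ===== PORT A =====
-- for row_num in range(1, pattern_length): build the two mirrored slices and test
-- all([...]) over the flattened list of zipped element pairs ([::-1] ported as .reverse,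
-- exact per PySem.List.slice?_none_none_neg_one).
def frlA_loop (pattern : List (List String)) : List Int → Option Int
  | [] => none
  | row_num :: rest =>
      let pattern_length : Int := PySem.List.len pattern
      let min_pattern_length : Int := min row_num (pattern_length - row_num)
      let sub_pattern_1 :=
        PySem.List.slice ((PySem.List.slice pattern none (some row_num)).reverse)
          none (some min_pattern_length)
      let sub_pattern_2 :=
        PySem.List.slice (PySem.List.slice pattern (some row_num) none)
          none (some min_pattern_length)
      if ((sub_pattern_1.zip sub_pattern_2).flatMap
            (fun p => p.1.zip p.2)).all (fun q => q.1 == q.2)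
      then some row_num
      else frlA_loop pattern rest

def find_reflection_line (pattern : List (List String)) : Option Int :=
  frlA_loop pattern (PySem.List.pyRange 1 (PySem.List.len pattern) 1)

-- ===== PORT B =====
-- _rows_match: scan the common prefix of the two rows, early exit on the first difference.
def rowsMatch : List String → List String → Bool
  | x :: xs, y :: ys => x == y && rowsMatch xs ys
  | _, _ => true

-- the 'while i >= 0 and j < n and _rows_match(...)' loop; result true ↔ the loop ran off an end.
def frlB_expand (pattern : List (List String)) (i j : Int) : Bool :=
  if h : 0 ≤ i ∧ j < PySem.List.len pattern then
    if rowsMatch (PySem.List.pyGetD pattern i []) (PySem.List.pyGetD pattern j []) then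
      frlB_expand pattern (i - 1) (j + 1)
    else false
  else true
termination_by (PySem.List.len pattern - j).toNat
decreasing_by
  simp only [PySem.List.len] at *
  omega

def frlB_loop (pattern : List (List String)) : List Int → Option Int
  | [] => none
  | b :: rest =>
      if frlB_expand pattern (b - 1) b then some b
      else frlB_loop pattern rest

def find_reflection_line_alt (pattern : List (List String)) : Option Int :=
  frlB_loop pattern (PySem.List.pyRange 1 (PySem.List.len pattern) 1)

-- ===== PRECONDITION & SPEC =====
def Spec_find_reflection_line (pattern : List (List String)) (out : Option Int) : Prop := out = find_reflection_line_alt pattern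
instance (pattern : List (List String)) (out : Option Int) : Decidable (Spec_find_reflection_line pattern out) := by unfold Spec_find_reflection_line; infer_instance

-- ===== CLAIM (what is proved, stated in full; the proofs are below) =====
def Claim_equal_find_reflection_line : Prop := ∀ (pattern : List (List String)), Dom_find_reflection_line pattern → Spec_find_reflection_line pattern (find_reflection_line pattern)

-- ===== LEMMAS AND PROOFS =====

-- B's row scan equals A's inner "all pairs of the zipped rows are equal".
theorem rowsMatch_eq_zip_all (r1 r2 : List String) :
    ((r1.zip r2).all (fun q => q.1 == q.2)) = rowsMatch r1 r2 := by
  induction r1 generalizing r2 with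
  | nil => cases r2 <;> simp [rowsMatch]
  | cons x xs ih =>
    cases r2 with
    | nil => simp [rowsMatch]
    | cons y ys => simp [rowsMatch, ih]

-- B's while-loop computes "all mirrored row pairs match", phrased on the zip of the
-- reversed prefix up to i+1 with the suffix from j.
theorem frlB_expand_eq (pattern : List (List String)) (i j : Int) (hj : 0 ≤ j) (hij : i < j) :
    frlB_expand pattern i j =
      (((pattern.take (i + 1).toNat).reverse).zip (pattern.drop j.toNat)).all
        (fun p => rowsMatch p.1 p.2) := by
  induction i, j using frlB_expand.induct pattern with
  | case1 i j h hm ih =>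
    rw [frlB_expand]
    simp only [h, and_self, dif_pos, hm, if_pos]
    rw [ih (by omega) (by omega)]
    obtain ⟨hi, hjlen⟩ := h
    simp only [PySem.List.len] at hjlen
    have hilen : i < (pattern.length : Int) := by omega
    have htake : pattern.take (i + 1).toNat
        = pattern.take i.toNat ++ [pattern[i.toNat]] := by
      have : (i + 1).toNat = i.toNat + 1 := by omega
      rw [this]
      exact List.take_succ_eq_append_getElem (by omega)
    have hdrop : pattern.drop j.toNat
        = pattern[j.toNat] :: pattern.drop (j.toNat + 1) := by
      exact List.drop_eq_getElem_cons (by omega)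
    have hi1 : (i - 1 + 1).toNat = i.toNat := by omega
    have hj1 : (j + 1).toNat = j.toNat + 1 := by omega
    rw [htake, hdrop, List.reverse_append]
    simp only [List.reverse_singleton, List.singleton_append, List.zip_cons_cons,
      List.all_cons, hi1, hj1]
    have hg1 : PySem.List.pyGetD pattern i [] = pattern[i.toNat] :=
      PySem.List.pyGetD_eq_getElem pattern [] hi hilen
    have hg2 : PySem.List.pyGetD pattern j [] = pattern[j.toNat] :=
      PySem.List.pyGetD_eq_getElem pattern [] hj (by omega)
    rw [hg1, hg2] at hm
    simp [hm]
  | case2 i j h hm =>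
    rw [frlB_expand]
    simp only [h, and_self, dif_pos, hm, Bool.false_eq]
    obtain ⟨hi, hjlen⟩ := h
    simp only [PySem.List.len] at hjlen
    have hilen : i < (pattern.length : Int) := by omega
    have htake : pattern.take (i + 1).toNat
        = pattern.take i.toNat ++ [pattern[i.toNat]] := by
      have : (i + 1).toNat = i.toNat + 1 := by omega
      rw [this]
      exact List.take_succ_eq_append_getElem (by omega)
    have hdrop : pattern.drop j.toNat
        = pattern[j.toNat] :: pattern.drop (j.toNat + 1) := by
      exact List.drop_eq_getElem_cons (by omega)
    rw [htake, hdrop, List.reverse_append]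
    simp only [List.reverse_singleton, List.singleton_append, List.zip_cons_cons,
      List.all_cons]
    have hg1 : PySem.List.pyGetD pattern i [] = pattern[i.toNat] :=
      PySem.List.pyGetD_eq_getElem pattern [] hi hilen
    have hg2 : PySem.List.pyGetD pattern j [] = pattern[j.toNat] :=
      PySem.List.pyGetD_eq_getElem pattern [] hj (by omega)
    rw [hg1, hg2] at hm
    simp [hm]
  | case3 i j h =>
    rw [frlB_expand]
    simp only [dif_neg h]
    simp only [PySem.List.len, not_and, not_lt] at h
    by_cases hi : 0 ≤ i
    · have hjlen : (pattern.length : Int) ≤ j := h hi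
      have : pattern.length ≤ j.toNat := by omega
      rw [List.drop_eq_nil_of_le this]
      simp
    · have : (i + 1).toNat = 0 := by omega
      rw [this]
      simp

-- A's per-candidate test equals B's expand, for a candidate 1 ≤ r < n.
theorem cond_eq (pattern : List (List String)) (k : Nat) (hk : 1 ≤ k)
    (hkn : k < pattern.length) :
    (((PySem.List.slice ((PySem.List.slice pattern none (some (k : Int))).reverse)
         none (some (min (k : Int) (PySem.List.len pattern - (k : Int))))).zip
       (PySem.List.slice (PySem.List.slice pattern (some (k : Int)) none)
         none (some (min (k : Int) (PySem.List.len pattern - (k : Int)))))).flatMap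
        (fun p => p.1.zip p.2)).all (fun q => q.1 == q.2)
      = frlB_expand pattern ((k : Int) - 1) (k : Int) := by
  have hm : min (k : Int) (PySem.List.len pattern - (k : Int))
      = ((min k (pattern.length - k) : Nat) : Int) := by
    simp only [PySem.List.len]
    omega
  rw [hm, PySem.List.slice_to_natCast, PySem.List.slice_from_natCast,
    PySem.List.slice_to_natCast, PySem.List.slice_to_natCast]
  set m : Nat := min k (pattern.length - k) with hmdef
  have hlen1 : ((pattern.take k).reverse).length = k := by
    simp [List.length_take, Nat.min_eq_left (le_of_lt hkn)]
  have hlen2 : (pattern.drop k).length = pattern.length - k := by simp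
  have hzip : (((pattern.take k).reverse).take m).zip ((pattern.drop k).take m)
      = ((pattern.take k).reverse).zip (pattern.drop k) := by
    rw [List.zip_eq_zipWith, List.zip_eq_zipWith, ← List.take_zipWith]
    apply List.take_of_length_le
    rw [List.length_zipWith, hlen1, hlen2]
  rw [hzip, List.all_flatMap]
  have hfun : (fun (p : List String × List String) => (p.1.zip p.2).all (fun q => q.1 == q.2))
      = fun p => rowsMatch p.1 p.2 := by
    funext p
    exact rowsMatch_eq_zip_all p.1 p.2
  rw [hfun, frlB_expand_eq pattern ((k : Int) - 1) (k : Int) (by omega) (by omega)]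
  have h1 : ((k : Int) - 1 + 1).toNat = k := by omega
  have h2 : ((k : Int)).toNat = k := by omega
  rw [h1, h2]

-- the two outer loops agree candidate by candidate.
theorem loops_eq (pattern : List (List String)) (rs : List Int)
    (h : ∀ r ∈ rs, 1 ≤ r ∧ r < (pattern.length : Int)) :
    frlA_loop pattern rs = frlB_loop pattern rs := by
  induction rs with
  | nil => rfl
  | cons r rest ih =>
    obtain ⟨hr1, hrn⟩ := h r (List.mem_cons_self)
    have hk1 : 1 ≤ r.toNat := by omega
    have hkn : r.toNat < pattern.length := by omega
    have hr : ((r.toNat : Nat) : Int) = r := by omega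
    have hc := cond_eq pattern r.toNat hk1 hkn
    rw [hr] at hc
    simp only [frlA_loop, frlB_loop, hc]
    split
    · rfl
    · exact ih (fun x hx => h x (List.mem_cons_of_mem r hx))

-- ===== VERDICT (by name: the statement is the Claim_ definition above) =====
theorem find_reflection_line_spec : Claim_equal_find_reflection_line := by
  intro pattern _
  unfold Spec_find_reflection_line find_reflection_line find_reflection_line_alt
  apply loops_eq
  intro r hr
  have := (PySem.List.mem_pyRange_one).mp hr
  simp only [PySem.List.len] at this
  exact ⟨this.1, by omega⟩
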